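-- pv_equiv track=rewrite | github.com/LPA-AI-Projects/LPA-AI-Projects-AI-Academic-Automations | app/services/pdf_service.py | _extract_overview
-- ===== SOURCE A (Python) =====
-- from typing import Iterable
--
-- def _collect_section_lines(lines: list[str], heading_keywords: Iterable[str]) -> list[str]:
--     """
--     Collect lines after a matching markdown heading until the next heading.
--     """
--     keywords = [k.lower() for k in heading_keywords]
--     active = False
--     collected: list[str] = []
--
--     for raw in lines:
--         line = raw.rstrip()
--         stripped = line.strip()
--         if not stripped:
--             if active:
--                 collected.append("")
--             continue
--
--         is_heading = stripped.startswith("#")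
--         if is_heading:
--             normalized_heading = stripped.lstrip("#").strip().lower()
--             if any(k in normalized_heading for k in keywords):
--                 active = True
--                 continue
--             if active:
--                 break
--             continue
--
--         if active:
--             collected.append(stripped)
--
--     return [line for line in collected if line.strip()]
--
-- def _extract_overview(outline_text: str) -> str:
--     lines = (outline_text or "").splitlines()
--     overview_lines = _collect_section_lines(lines, ("overview", "course overview"))
--     if overview_lines:
--         return "\n".join(overview_lines).strip()
--
--     # Fallback: first non-heading paragraph block after title.
--     body_lines: list[str] = []
--     for raw in lines:
--         stripped = raw.strip()
--         if not stripped: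
--             if body_lines:
--                 break
--             continue
--         if stripped.startswith("#"):
--             continue
--         body_lines.append(stripped)
--         if len(body_lines) >= 8:
--             break
--     fallback = "\n".join(body_lines).strip()
--     if fallback:
--         return fallback
--
--     # Final fallback: keep visible content even if headings are unusual.
--     return (outline_text or "").strip()
-- ===== SOURCE B (Python) =====
-- def _is_overview_heading(stripped):
--     return stripped.startswith("#") and "overview" in stripped.lstrip("#").strip().lower()
--
-- def _section_after(lines):
--     for i, raw in enumerate(lines):
--         if _is_overview_heading(raw.strip()):
--             return lines[i + 1:]
--     return None
--
-- def _scan_section(rest):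
--     out = []
--     for raw in rest:
--         s = raw.strip()
--         if not s:
--             out.append("")
--         elif s.startswith("#"):
--             if _is_overview_heading(s):
--                 continue
--             break
--         else:
--             out.append(s)
--     return out
--
-- def _first_paragraph(lines):
--     flat = [raw.strip() for raw in lines if not raw.strip().startswith("#")]
--     while flat and not flat[0]:
--         flat = flat[1:]
--     out = []
--     for s in flat:
--         if not s or len(out) >= 8:
--             break
--         out.append(s)
--     return out
--
-- def _extract_overview(outline_text):
--     lines = (outline_text or "").splitlines()
--     rest = _section_after(lines)
--     collected = _scan_section(rest) if rest is not None else []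
--     overview = [l for l in collected if l.strip()]
--     if overview:
--         return "\n".join(overview).strip()
--     fallback = "\n".join(_first_paragraph(lines)).strip()
--     if fallback:
--         return fallback
--     return (outline_text or "").strip()
-- ===== Notes on version B (the rewrite author's own statement) =====
-- stated objective: simpler
-- what changed: Replaced A's single-pass active-flag state machine with a locate-then-scan decomposition (find the overview heading, then scan the section after it), and rewrote the fallback paragraph loop as a strip/filter-headings/drop-blanks/take-until-blank-capped-at-8 pipeline.
import Mathlib
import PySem

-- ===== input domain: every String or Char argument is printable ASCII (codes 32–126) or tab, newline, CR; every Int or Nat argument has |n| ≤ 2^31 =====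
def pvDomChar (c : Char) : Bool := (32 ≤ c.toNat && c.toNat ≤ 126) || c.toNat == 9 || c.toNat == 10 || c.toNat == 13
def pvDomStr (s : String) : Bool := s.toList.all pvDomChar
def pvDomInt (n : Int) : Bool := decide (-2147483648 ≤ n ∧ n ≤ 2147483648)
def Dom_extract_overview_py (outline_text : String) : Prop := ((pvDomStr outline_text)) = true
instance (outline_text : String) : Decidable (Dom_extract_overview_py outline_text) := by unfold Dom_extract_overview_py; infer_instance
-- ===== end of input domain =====

-- B replaces A's single-pass active-flag state machine by a locate-then-scan decomposition
-- (find the overview heading, scan the section after it; fallback as a filter/drop/take pipeline);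
-- objective: simpler, same cost.

-- ===== PORT A =====
-- s.lstrip("#"): exact — drops exactly the leading '#' characters
def pvLstripHash (s : List Char) : List Char := s.dropWhile (· == '#')

-- the for-loop of _collect_section_lines, state (active, collected); 'break' returns collected
def pvCollectLoop (keywords : List (List Char)) : List (List Char) → Bool → List (List Char) → List (List Char)
  | [], _, collected => collected
  | raw :: rest, active, collected =>
    let line := PySem.Chars.rstrip raw
    let stripped := PySem.Chars.strip line
    if stripped.isEmpty then
      pvCollectLoop keywords rest active (if active then collected ++ [[]] else collected)
    else if PySem.Chars.startswith stripped ['#'] then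
      let normalized_heading := PySem.Chars.lower (PySem.Chars.strip (pvLstripHash stripped))
      if keywords.any (fun k => PySem.Chars.isIn k normalized_heading) then
        pvCollectLoop keywords rest true collected
      else if active then collected
      else pvCollectLoop keywords rest active collected
    else
      pvCollectLoop keywords rest active (if active then collected ++ [stripped] else collected)

def pvCollectSectionLines (lines : List (List Char)) (heading_keywords : List (List Char)) : List (List Char) :=
  let keywords := heading_keywords.map PySem.Chars.lower
  (pvCollectLoop keywords lines false []).filter (fun line => !(PySem.Chars.strip line).isEmpty)

-- the fallback for-loop of _extract_overview
def pvFallbackLoop : List (List Char) → List (List Char) → List (List Char)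
  | [], body_lines => body_lines
  | raw :: rest, body_lines =>
    let stripped := PySem.Chars.strip raw
    if stripped.isEmpty then
      if body_lines.isEmpty then pvFallbackLoop rest body_lines else body_lines
    else if PySem.Chars.startswith stripped ['#'] then pvFallbackLoop rest body_lines
    else
      let body' := body_lines ++ [stripped]
      if 8 ≤ body'.length then body' else pvFallbackLoop rest body'

def extract_overview_py (outline_text : String) : String :=
  let lines := PySem.Chars.splitlines outline_text.toList
  let overview_lines := pvCollectSectionLines lines ["overview".toList, "course overview".toList]
  if !overview_lines.isEmpty then
    String.ofList (PySem.Chars.strip (PySem.Chars.join ['\n'] overview_lines))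
  else
    let fallback := PySem.Chars.strip (PySem.Chars.join ['\n'] (pvFallbackLoop lines []))
    if !fallback.isEmpty then String.ofList fallback
    else String.ofList (PySem.Chars.strip outline_text.toList)

-- ===== PORT B =====
def pvIsOverviewHeading (stripped : List Char) : Bool :=
  PySem.Chars.startswith stripped ['#'] &&
    PySem.Chars.isIn "overview".toList
      (PySem.Chars.lower (PySem.Chars.strip (stripped.dropWhile (· == '#'))))

-- _section_after: the lines after the first overview heading, if any
def pvSectionAfter : List (List Char) → Option (List (List Char))
  | [] => none
  | raw :: rest =>
    if pvIsOverviewHeading (PySem.Chars.strip raw) then some rest else pvSectionAfter rest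

-- _scan_section: collect the section, building the list front-to-back by cons
def pvScanSection : List (List Char) → List (List Char)
  | [] => []
  | raw :: rest =>
    let s := PySem.Chars.strip raw
    if s.isEmpty then [] :: pvScanSection rest
    else if PySem.Chars.startswith s ['#'] then
      if pvIsOverviewHeading s then pvScanSection rest else []
    else s :: pvScanSection rest

-- _first_paragraph: strip all lines, drop headings, drop leading blanks, take up to 8 until a blank
def pvParaTake : List (List Char) → Nat → List (List Char)
  | [], _ => []
  | s :: rest, k => if s.isEmpty || 8 ≤ k then [] else s :: pvParaTake rest (k + 1)

def pvFirstParagraph (lines : List (List Char)) : List (List Char) :=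
  let flat := (lines.map PySem.Chars.strip).filter
      (fun s => !PySem.Chars.startswith s ['#'])
  pvParaTake (flat.dropWhile List.isEmpty) 0

def extract_overview_py_alt (outline_text : String) : String :=
  let lines := PySem.Chars.splitlines outline_text.toList
  let collected := match pvSectionAfter lines with
    | some rest => pvScanSection rest
    | none => []
  let overview := collected.filter (fun l => !(PySem.Chars.strip l).isEmpty)
  if !overview.isEmpty then
    String.ofList (PySem.Chars.strip (PySem.Chars.join ['\n'] overview))
  else
    let fallback := PySem.Chars.strip (PySem.Chars.join ['\n'] (pvFirstParagraph lines))
    if !fallback.isEmpty then String.ofList fallback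
    else String.ofList (PySem.Chars.strip outline_text.toList)

-- ===== PRECONDITION & SPEC =====
def Spec_extract_overview_py (outline_text : String) (out : String) : Prop := out = extract_overview_py_alt outline_text
instance (outline_text : String) (out : String) : Decidable (Spec_extract_overview_py outline_text out) := by unfold Spec_extract_overview_py; infer_instance

-- ===== CLAIM (what is proved, stated in full; the proofs are below) =====
def Claim_equal_extract_overview_py : Prop := ∀ (outline_text : String), Dom_extract_overview_py outline_text → Spec_extract_overview_py outline_text (extract_overview_py outline_text)

-- ===== LEMMAS AND PROOFS =====

-- strip ∘ rstrip = strip (A strips after an rstrip; B strips directly)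

theorem pvRstrip_cons (c : Char) (l : List Char) :
    PySem.Chars.rstrip (c :: l) =
      if (PySem.Chars.rstrip l).isEmpty then (if PySem.Chars.isspace c then [] else [c])
      else c :: PySem.Chars.rstrip l := by
  simp only [PySem.Chars.rstrip, List.reverse_cons, List.dropWhile_append, List.isEmpty_iff,
    List.reverse_eq_nil_iff]
  by_cases h : List.dropWhile PySem.Chars.isspace l.reverse = [] <;>
    simp [h, List.dropWhile] <;> by_cases hc : PySem.Chars.isspace c <;> simp [hc]

theorem pvRstrip_idem (l : List Char) :
    PySem.Chars.rstrip (PySem.Chars.rstrip l) = PySem.Chars.rstrip l := by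
  simp [PySem.Chars.rstrip, List.dropWhile_idempotent]

theorem pvLstrip_rstrip_comm (l : List Char) :
    PySem.Chars.lstrip (PySem.Chars.rstrip l) = PySem.Chars.rstrip (PySem.Chars.lstrip l) := by
  induction l with
  | nil => rfl
  | cons c l ih =>
    rw [pvRstrip_cons]
    by_cases hc : PySem.Chars.isspace c <;>
      by_cases h : (PySem.Chars.rstrip l).isEmpty <;>
      simp only [List.isEmpty_iff] at h <;>
      simp_all [PySem.Chars.lstrip, List.dropWhile, hc, pvRstrip_cons]

theorem pvStrip_rstrip (l : List Char) :
    PySem.Chars.strip (PySem.Chars.rstrip l) = PySem.Chars.strip l := by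
  simp only [PySem.Chars.strip]
  rw [pvLstrip_rstrip_comm, pvRstrip_idem]

theorem pvAny_keyword_eq (nh : List Char) :
    (["overview".toList, "course overview".toList].map PySem.Chars.lower).any
      (fun k => PySem.Chars.isIn k nh) = PySem.Chars.isIn "overview".toList nh := by
  have h1 : PySem.Chars.lower "overview".toList = "overview".toList := by decide
  have h2 : PySem.Chars.lower "course overview".toList = "course overview".toList := by decide
  have himp : PySem.Chars.isIn "course overview".toList nh = true →
      PySem.Chars.isIn "overview".toList nh = true := fun h =>
    (PySem.Chars.isIn_iff_infix _ _).mpr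
      (List.IsInfix.trans (by decide) ((PySem.Chars.isIn_iff_infix _ _).mp h))
  show (PySem.Chars.isIn (PySem.Chars.lower "overview".toList) nh ||
      (PySem.Chars.isIn (PySem.Chars.lower "course overview".toList) nh || false)) =
      PySem.Chars.isIn "overview".toList nh
  rw [h1, h2, Bool.or_false]
  cases hco : PySem.Chars.isIn "course overview".toList nh
  · rw [Bool.or_false]
  · rw [Bool.or_true]
    exact (himp hco).symm

-- once active, A's loop collects exactly B's scan of the remaining lines
theorem pvCollectLoop_active (lines : List (List Char)) (coll : List (List Char)) :
    pvCollectLoop (["overview".toList, "course overview".toList].map PySem.Chars.lower)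
      lines true coll = coll ++ pvScanSection lines := by
  induction lines generalizing coll with
  | nil => simp [pvCollectLoop, pvScanSection]
  | cons raw rest ih =>
    rw [pvCollectLoop, pvScanSection]
    simp only [pvStrip_rstrip]
    by_cases h1 : (PySem.Chars.strip raw).isEmpty
    · simp only [h1, if_pos, if_true]
      rw [ih]
      simp
    · simp only [h1, if_neg, Bool.false_eq_true, not_false_iff, if_false]
      by_cases h2 : PySem.Chars.startswith (PySem.Chars.strip raw) ['#'] = true
      · simp only [h2, if_pos, pvAny_keyword_eq, pvIsOverviewHeading, pvLstripHash,
          Bool.true_and, if_true]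
        by_cases h3 : PySem.Chars.isIn "overview".toList
            (PySem.Chars.lower (PySem.Chars.strip
              ((PySem.Chars.strip raw).dropWhile (· == '#')))) = true
        · rw [h3, if_pos rfl, if_pos rfl, ih]
        · rw [Bool.eq_false_iff.mpr h3]
          simp
      · simp only [Bool.not_eq_true] at h2
        simp only [h2, Bool.false_eq_true, if_false]
        rw [ih]
        simp

-- before activation, A's loop is B's locate-then-scan
theorem pvCollectLoop_inactive (lines : List (List Char)) (coll : List (List Char)) :
    pvCollectLoop (["overview".toList, "course overview".toList].map PySem.Chars.lower)
      lines false coll =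
      coll ++ (match pvSectionAfter lines with
        | some rest => pvScanSection rest
        | none => []) := by
  induction lines generalizing coll with
  | nil => simp [pvCollectLoop, pvSectionAfter]
  | cons raw rest ih =>
    rw [pvCollectLoop, pvSectionAfter]
    simp only [pvStrip_rstrip]
    by_cases h1 : (PySem.Chars.strip raw).isEmpty
    · have hsw : pvIsOverviewHeading (PySem.Chars.strip raw) = false := by
        rw [List.isEmpty_iff] at h1
        rw [pvIsOverviewHeading, h1]
        decide
      simp only [h1, if_pos, if_true, hsw, Bool.false_eq_true, if_false]
      exact ih coll
    · simp only [h1, if_neg, Bool.false_eq_true, not_false_iff, if_false]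
      by_cases h2 : PySem.Chars.startswith (PySem.Chars.strip raw) ['#'] = true
      · by_cases h3 : PySem.Chars.isIn "overview".toList
            (PySem.Chars.lower (PySem.Chars.strip
              ((PySem.Chars.strip raw).dropWhile (· == '#')))) = true
        · have hsw : pvIsOverviewHeading (PySem.Chars.strip raw) = true := by
            rw [pvIsOverviewHeading, h2, Bool.true_and]
            exact h3
          simp only [h2, if_pos, if_true, pvAny_keyword_eq, pvLstripHash, h3, hsw]
          exact pvCollectLoop_active rest coll
        · have hsw : pvIsOverviewHeading (PySem.Chars.strip raw) = false := by
            rw [pvIsOverviewHeading, h2, Bool.true_and]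
            exact Bool.eq_false_iff.mpr h3
          simp only [h2, if_pos, if_true, pvAny_keyword_eq, pvLstripHash,
            Bool.eq_false_iff.mpr h3, Bool.false_eq_true, if_false, hsw]
          exact ih coll
      · have hsw : pvIsOverviewHeading (PySem.Chars.strip raw) = false := by
          simp only [Bool.not_eq_true] at h2
          simp [pvIsOverviewHeading, h2]
        simp only [Bool.not_eq_true] at h2
        simp only [h2, Bool.false_eq_true, if_false, hsw]
        exact ih coll

theorem pvParaTake_stop (xs : List (List Char)) (k : Nat) (hk : 8 ≤ k) : pvParaTake xs k = [] := by
  cases xs with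
  | nil => rfl
  | cons s rest => rw [pvParaTake]; simp [hk]

-- A's fallback loop with a nonempty accumulator is B's capped take
theorem pvFallback_active (lines : List (List Char)) (body : List (List Char))
    (hne : body ≠ []) (hlt : body.length < 8) :
    pvFallbackLoop lines body =
      body ++ pvParaTake ((lines.map PySem.Chars.strip).filter
        (fun s => !PySem.Chars.startswith s ['#'])) body.length := by
  induction lines generalizing body with
  | nil => simp [pvFallbackLoop, pvParaTake]
  | cons raw rest ih =>
    rw [pvFallbackLoop]
    simp only [List.map_cons, List.filter_cons]
    by_cases h1 : (PySem.Chars.strip raw).isEmpty = true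
    · have hsw : PySem.Chars.startswith (PySem.Chars.strip raw) ['#'] = false := by
        rw [List.isEmpty_iff] at h1
        rw [h1]
        decide
      have hbe : body.isEmpty = false := by simpa [List.isEmpty_iff] using hne
      rw [if_pos h1, hbe]
      simp [hsw, pvParaTake, h1]
    · rw [if_neg h1]
      by_cases h2 : PySem.Chars.startswith (PySem.Chars.strip raw) ['#'] = true
      · rw [if_pos h2]
        simp only [h2, Bool.not_true, Bool.false_eq_true, if_false]
        exact ih body hne hlt
      · rw [if_neg h2]
        simp only [Bool.not_eq_true] at h2
        simp only [h2, Bool.not_false]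
        rw [if_pos trivial, pvParaTake]
        have hc : ((PySem.Chars.strip raw).isEmpty || decide (8 ≤ body.length)) = false := by
          simp only [Bool.or_eq_false_iff]
          exact ⟨Bool.eq_false_iff.mpr h1, by simpa using Nat.not_le.mpr hlt⟩
        rw [hc]
        simp only [Bool.false_eq_true, if_false]
        by_cases hcap : 8 ≤ (body ++ [PySem.Chars.strip raw]).length
        · rw [if_pos hcap]
          rw [pvParaTake_stop _ _ (by simpa using hcap)]
        · rw [if_neg hcap]
          rw [ih _ (by simp) (by simp only [List.length_append, List.length_cons,
            List.length_nil] at hcap ⊢; omega)]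
          simp

theorem pvFallback_eq (lines : List (List Char)) :
    pvFallbackLoop lines [] = pvFirstParagraph lines := by
  induction lines with
  | nil => simp [pvFallbackLoop, pvFirstParagraph, pvParaTake]
  | cons raw rest ih =>
    rw [pvFallbackLoop]
    simp only [pvFirstParagraph, List.map_cons, List.filter_cons]
    by_cases h1 : (PySem.Chars.strip raw).isEmpty = true
    · have hsw : PySem.Chars.startswith (PySem.Chars.strip raw) ['#'] = false := by
        rw [List.isEmpty_iff] at h1
        rw [h1]
        decide
      rw [if_pos h1]
      simp only [List.isEmpty_nil, if_pos, if_true, hsw, Bool.not_false, List.dropWhile_cons, h1,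
        if_true]
      rw [ih]
      rfl
    · rw [if_neg h1]
      by_cases h2 : PySem.Chars.startswith (PySem.Chars.strip raw) ['#'] = true
      · rw [if_pos h2]
        simp only [h2, Bool.not_true, Bool.false_eq_true, if_false]
        rw [ih]
        rfl
      · rw [if_neg h2]
        simp only [Bool.not_eq_true] at h2
        simp only [h2, Bool.not_false, if_pos, if_true, List.nil_append, List.length_nil]
        rw [if_neg (by simp)]
        rw [pvFallback_active rest [PySem.Chars.strip raw] (by simp) (by simp)]
        simp only [List.dropWhile_cons, Bool.eq_false_iff.mpr h1, Bool.false_eq_true, if_false,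
          List.length_cons, List.length_nil, List.singleton_append]
        rw [pvParaTake]
        simp [Bool.eq_false_iff.mpr h1]

-- ===== VERDICT (by name: the statement is the Claim_ definition above) =====
theorem extract_overview_py_spec : Claim_equal_extract_overview_py := by
  intro outline_text _
  unfold Spec_extract_overview_py extract_overview_py extract_overview_py_alt
  simp only [pvCollectSectionLines, pvCollectLoop_inactive, pvFallback_eq, List.nil_append]
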